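-- pv_equiv track=rewrite | github.com/prudhvi97/Bharatanatyam_Dance_Synthesis | bvh_library/modify_bvh.py | add_end_sites
-- ===== SOURCE A (Python) =====
-- def add_end_sites(input_text):
--     lines = input_text.split('\n')
--     output_lines = []
--     previous_line_was_channels = False
--
--     for line in lines:
--         stripped = line.strip()
--
--         if stripped.startswith('CHANNELS'):
--             previous_line_was_channels = True
--             indent_level_channels = line.index(stripped[0])
--         elif stripped.startswith('}') and previous_line_was_channels:
--             output_lines.append(' ' * indent_level_channels + 'End Site')
--             output_lines.append(' ' * indent_level_channels + '{')
--             output_lines.append(' ' * (indent_level_channels + 4) + 'OFFSET 0 0 0')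
--             output_lines.append(' ' * indent_level_channels + '}')
--             previous_line_was_channels = False
--
--         output_lines.append(line)
--
--     return '\n'.join(output_lines)
-- ===== SOURCE B (Python) =====
-- def add_end_sites(input_text):
--     lines = input_text.split('\n')
--     # Phase 1: extract the event lines (CHANNELS / '}') with their indices,
--     # then derive the insertion points: a '}' event gets an End Site block
--     # exactly when the immediately preceding event is a CHANNELS event,
--     # at that CHANNELS line's indentation.
--     events = []  # (line_index, indent, is_channels)
--     for i, line in enumerate(lines):
--         s = line.strip()
--         if s.startswith('CHANNELS'):
--             events.append((i, line.index(s[0]), True))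
--         elif s.startswith('}'):
--             events.append((i, 0, False))
--     inserts = [(cur[0], prev[1]) for prev, cur in zip(events, events[1:])
--                if prev[2] and not cur[2]]
--     # Phase 2: rebuild, consuming the (index-sorted) insertion list front to back.
--     out = []
--     k = 0
--     for i, line in enumerate(lines):
--         if k < len(inserts) and inserts[k][0] == i:
--             ind = inserts[k][1]
--             out.append(' ' * ind + 'End Site')
--             out.append(' ' * ind + '{')
--             out.append(' ' * (ind + 4) + 'OFFSET 0 0 0')
--             out.append(' ' * ind + '}')
--             k += 1
--         out.append(line)
--     return '\n'.join(out)
-- ===== Notes on version B (the rewrite author's own statement) =====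
-- stated objective: alternative
-- what changed: A's single fused scan that carries a flag and emits output as it goes is split into two phases: an indexing pass that pairs consecutive event lines (CHANNELS / '}') to compute the list of insertion points with their indents, and a separate rebuild pass that merges that list into the lines front-to-back with a pointer.
import Mathlib
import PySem

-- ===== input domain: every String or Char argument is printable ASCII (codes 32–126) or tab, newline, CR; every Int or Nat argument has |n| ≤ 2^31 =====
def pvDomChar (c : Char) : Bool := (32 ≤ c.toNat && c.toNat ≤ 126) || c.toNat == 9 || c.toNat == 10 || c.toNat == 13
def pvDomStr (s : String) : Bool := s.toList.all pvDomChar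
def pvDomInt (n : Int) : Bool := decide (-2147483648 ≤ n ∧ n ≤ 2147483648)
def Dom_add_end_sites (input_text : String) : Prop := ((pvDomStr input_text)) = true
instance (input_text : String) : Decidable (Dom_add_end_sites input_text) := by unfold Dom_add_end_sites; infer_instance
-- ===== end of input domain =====

-- B replaces A's fused scan-and-emit state machine by two phases — an event-indexing pass
-- (consecutive-event pairs decide the insertion points) and a separate rebuild pass — same
-- output, same O(n) cost (objective: alternative decomposition).

-- Shared literal fragments of both Pythons:
-- ' ' * n + t is ported as String.mk (List.replicate n ' ' ++ t.toList) — exact on ASCII;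
-- line.index(stripped[0]) is ported via PySem.Str.find: stripped[0] always occurs in line
-- whenever this expression is evaluated (stripped is a substring of line), and str.index
-- equals str.find when the character is found.
def pvMkLine (n : Nat) (s : String) : String := String.mk (List.replicate n ' ' ++ s.toList)
def pvEndSite (n : Nat) : List String :=
  [pvMkLine n "End Site", pvMkLine n "{", pvMkLine (n + 4) "OFFSET 0 0 0", pvMkLine n "}"]
def pvIndent (line stripped : String) : Nat :=
  (PySem.Str.find line (String.mk [(PySem.Str.pyGet? stripped 0).getD 'C'])).toNat

-- ===== PORT A =====
-- the body of A's single for-loop (state: output_lines, previous_line_was_channels, indent_level_channels)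
def pvStepA (st : List String × Bool × Nat) (line : String) : List String × Bool × Nat :=
  if PySem.Str.startswith (PySem.Str.strip line) "CHANNELS" then
    (st.1 ++ [line], true, pvIndent line (PySem.Str.strip line))
  else if PySem.Str.startswith (PySem.Str.strip line) "}" && st.2.1 then
    (st.1 ++ pvEndSite st.2.2 ++ [line], false, st.2.2)
  else
    (st.1 ++ [line], st.2.1, st.2.2)

def add_end_sites (input_text : String) : String :=
  let lines := (PySem.Str.split? input_text "\n").getD []
  PySem.Str.join "\n" (lines.foldl pvStepA ([], false, 0)).1

-- ===== PORT B =====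
-- phase 1a of Source B: collect the event lines (index, indent, is_channels)
def pvStepE (ev : List (Int × Nat × Bool)) (p : Int × String) : List (Int × Nat × Bool) :=
  if PySem.Str.startswith (PySem.Str.strip p.2) "CHANNELS" then
    ev ++ [(p.1, pvIndent p.2 (PySem.Str.strip p.2), true)]
  else if PySem.Str.startswith (PySem.Str.strip p.2) "}" then
    ev ++ [(p.1, 0, false)]
  else ev

-- phase 1b of Source B: the list comprehension over zip(events, events[1:])
def pvPairs (es : List (Int × Nat × Bool)) : List (Int × Nat) :=
  ((es.zip es.tail).filter (fun pc => pc.1.2.2 && !pc.2.2.2)).map (fun pc => (pc.2.1, pc.1.2.1))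

-- phase 2 of Source B: rebuild, consuming inserts via the pointer k (state: out, k)
def pvStepR (ins : List (Int × Nat)) (st : List String × Nat) (p : Int × String) : List String × Nat :=
  match ins[st.2]? with
  | some jd =>
      if jd.1 == p.1 then (st.1 ++ pvEndSite jd.2 ++ [p.2], st.2 + 1)
      else (st.1 ++ [p.2], st.2)
  | none => (st.1 ++ [p.2], st.2)

def add_end_sites_alt (input_text : String) : String :=
  let lines := (PySem.Str.split? input_text "\n").getD []
  let events := (PySem.List.enumerate lines).foldl pvStepE []
  let inserts := pvPairs events
  PySem.Str.join "\n" ((PySem.List.enumerate lines).foldl (pvStepR inserts) ([], 0)).1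

-- ===== PRECONDITION & SPEC =====
def Spec_add_end_sites (input_text : String) (out : String) : Prop := out = add_end_sites_alt input_text
instance (input_text : String) (out : String) : Decidable (Spec_add_end_sites input_text out) := by unfold Spec_add_end_sites; infer_instance

-- ===== CLAIM (what is proved, stated in full; the proofs are below) =====
def Claim_equal_add_end_sites : Prop := ∀ (input_text : String), Dom_add_end_sites input_text → Spec_add_end_sites input_text (add_end_sites input_text)

-- ===== LEMMAS AND PROOFS =====

-- A's loop as structural recursion on the line list
def pvOutA : List String → Bool → Nat → List String
  | [], _, _ => []
  | l :: ls, fl, m =>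
    if PySem.Str.startswith (PySem.Str.strip l) "CHANNELS" then
      l :: pvOutA ls true (pvIndent l (PySem.Str.strip l))
    else if PySem.Str.startswith (PySem.Str.strip l) "}" then
      (if fl then pvEndSite m else []) ++ l :: pvOutA ls false m
    else l :: pvOutA ls fl m

-- B's event list as structural recursion
def pvEvts : List String → Int → List (Int × Nat × Bool)
  | [], _ => []
  | l :: ls, i =>
    if PySem.Str.startswith (PySem.Str.strip l) "CHANNELS" then
      (i, pvIndent l (PySem.Str.strip l), true) :: pvEvts ls (i + 1)
    else if PySem.Str.startswith (PySem.Str.strip l) "}" then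
      (i, 0, false) :: pvEvts ls (i + 1)
    else pvEvts ls (i + 1)

-- the insertion points, recursively (m/fl = indent and kind of the previous event)
def pvIns : List String → Int → Nat → Bool → List (Int × Nat)
  | [], _, _, _ => []
  | l :: ls, i, m, fl =>
    if PySem.Str.startswith (PySem.Str.strip l) "CHANNELS" then
      pvIns ls (i + 1) (pvIndent l (PySem.Str.strip l)) true
    else if PySem.Str.startswith (PySem.Str.strip l) "}" then
      (if fl then [(i, m)] else []) ++ pvIns ls (i + 1) 0 false
    else pvIns ls (i + 1) m fl

-- B's rebuild as structural recursion, consuming the insert list front to back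
def pvRebuild : List String → Int → List (Int × Nat) → List String
  | [], _, _ => []
  | l :: ls, i, [] => l :: pvRebuild ls (i + 1) []
  | l :: ls, i, (j, d) :: rest =>
    if j = i then pvEndSite d ++ l :: pvRebuild ls (i + 1) rest
    else l :: pvRebuild ls (i + 1) ((j, d) :: rest)

lemma pvIns_key_ge (ls : List String) : ∀ (i : Int) (m : Nat) (fl : Bool) (p : Int × Nat),
    p ∈ pvIns ls i m fl → i ≤ p.1 := by
  induction ls with
  | nil => intro i m fl p h; simp [pvIns] at h
  | cons l ls ih =>
    intro i m fl p h
    obtain ⟨j, d⟩ := p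
    rw [pvIns] at h
    by_cases hC : PySem.Str.startswith (PySem.Str.strip l) "CHANNELS"
    · rw [if_pos hC] at h
      have := ih (i + 1) _ _ _ h; simp only at this ⊢; omega
    · rw [if_neg hC] at h
      by_cases hB : PySem.Str.startswith (PySem.Str.strip l) "}"
      · rw [if_pos hB] at h
        rcases List.mem_append.mp h with h | h
        · cases fl with
          | true =>
            rw [if_pos rfl] at h
            have h2 : j = i ∧ d = m := by simpa using List.mem_singleton.mp h
            simp [h2.1]
          | false => simp at h
        · have := ih (i + 1) _ _ _ h; simp only at this ⊢; omega
      · rw [if_neg hB] at h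
        have := ih (i + 1) _ _ _ h; simp only at this ⊢; omega

lemma pvIns_false_irrel (ls : List String) : ∀ (i : Int) (m m' : Nat),
    pvIns ls i m false = pvIns ls i m' false := by
  induction ls with
  | nil => intro i m m'; rfl
  | cons l ls ih =>
    intro i m m'
    rw [pvIns, pvIns]
    by_cases hC : PySem.Str.startswith (PySem.Str.strip l) "CHANNELS"
    · rw [if_pos hC, if_pos hC]
    · rw [if_neg hC, if_neg hC]
      by_cases hB : PySem.Str.startswith (PySem.Str.strip l) "}"
      · rw [if_pos hB, if_pos hB]; simp
      · rw [if_neg hB, if_neg hB]; exact ih (i + 1) m m'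

lemma pv_bridge (ls : List String) : ∀ (i : Int) (fl : Bool) (m : Nat),
    pvOutA ls fl m = pvRebuild ls i (pvIns ls i m fl) := by
  induction ls with
  | nil => intro i fl m; rfl
  | cons l ls ih =>
    intro i fl m
    have hnot : ∀ (m' : Nat) (fl' : Bool) (rest : List (Int × Nat)),
        rest = pvIns ls (i + 1) m' fl' →
        pvRebuild (l :: ls) i rest = l :: pvRebuild ls (i + 1) rest := by
      intro m' fl' rest hrest
      cases rest with
      | nil => rfl
      | cons q qs =>
        obtain ⟨j, d⟩ := q
        have hge : i + 1 ≤ j := by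
          have := pvIns_key_ge ls (i + 1) m' fl' (j, d) (hrest ▸ List.mem_cons_self)
          simpa using this
        rw [pvRebuild]
        rw [if_neg (by omega)]
    rw [pvOutA, pvIns]
    by_cases hC : PySem.Str.startswith (PySem.Str.strip l) "CHANNELS"
    · rw [if_pos hC, if_pos hC, hnot _ _ _ rfl, ih (i + 1)]
    · rw [if_neg hC, if_neg hC]
      by_cases hB : PySem.Str.startswith (PySem.Str.strip l) "}"
      · rw [if_pos hB, if_pos hB]
        cases fl with
        | true =>
          rw [if_pos rfl, if_pos rfl]
          have : pvRebuild (l :: ls) i ((i, m) :: pvIns ls (i + 1) 0 false) =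
              pvEndSite m ++ l :: pvRebuild ls (i + 1) (pvIns ls (i + 1) 0 false) := by
            rw [pvRebuild, if_pos rfl]
          simp only [List.singleton_append]
          rw [this, pvIns_false_irrel ls (i + 1) 0 m, ← ih (i + 1)]
        | false =>
          rw [if_neg (by simp), if_neg (by simp)]
          simp only [List.nil_append]
          rw [hnot 0 false _ rfl, pvIns_false_irrel ls (i + 1) 0 m, ← ih (i + 1)]
      · rw [if_neg hB, if_neg hB]
        rw [hnot m fl _ rfl, ← ih (i + 1)]

lemma pv_foldA (ls : List String) : ∀ (out : List String) (fl : Bool) (m : Nat),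
    (ls.foldl pvStepA (out, fl, m)).1 = out ++ pvOutA ls fl m := by
  induction ls with
  | nil => intro out fl m; simp [pvOutA]
  | cons l ls ih =>
    intro out fl m
    rw [List.foldl_cons, pvOutA]
    by_cases hC : PySem.Str.startswith (PySem.Str.strip l) "CHANNELS"
    · have e1 : pvStepA (out, fl, m) l = (out ++ [l], true, pvIndent l (PySem.Str.strip l)) := by
        rw [pvStepA, if_pos hC]
      rw [e1, ih, if_pos hC]; simp
    -- marker-foldA
    · by_cases hB : PySem.Str.startswith (PySem.Str.strip l) "}"
      · cases fl with
        | true =>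
          have e1 : pvStepA (out, true, m) l = (out ++ pvEndSite m ++ [l], false, m) := by
            rw [pvStepA, if_neg hC, if_pos (by rw [hB]; rfl)]
          rw [e1, ih, if_neg hC, if_pos hB, if_pos rfl]; simp
        | false =>
          have e1 : pvStepA (out, false, m) l = (out ++ [l], false, m) := by
            rw [pvStepA, if_neg hC, if_neg (by simp)]
          rw [e1, ih, if_neg hC, if_pos hB, if_neg (by simp)]; simp
      · have e1 : pvStepA (out, fl, m) l = (out ++ [l], fl, m) := by
          rw [pvStepA, if_neg hC, if_neg (by intro hcon; exact hB ((Bool.and_eq_true _ _).mp hcon).1)]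
        rw [e1, ih, if_neg hC, if_neg hB]; simp

lemma pv_foldE (ls : List String) : ∀ (i : Int) (ev : List (Int × Nat × Bool)),
    (PySem.List.enumerate ls i).foldl pvStepE ev = ev ++ pvEvts ls i := by
  induction ls with
  | nil => intro i ev; simp [PySem.List.enumerate_nil, pvEvts]
  | cons l ls ih =>
    intro i ev
    rw [PySem.List.enumerate_cons, List.foldl_cons, pvEvts]
    by_cases hC : PySem.Str.startswith (PySem.Str.strip l) "CHANNELS"
    · have e1 : pvStepE ev (i, l) = ev ++ [(i, pvIndent l (PySem.Str.strip l), true)] := by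
        rw [pvStepE, if_pos hC]
      rw [e1, ih, if_pos hC]; simp
    -- marker-foldA
    · by_cases hB : PySem.Str.startswith (PySem.Str.strip l) "}"
      · have e1 : pvStepE ev (i, l) = ev ++ [(i, 0, false)] := by
          rw [pvStepE, if_neg hC, if_pos hB]
        rw [e1, ih, if_neg hC, if_pos hB]; simp
      · have e1 : pvStepE ev (i, l) = ev := by
          rw [pvStepE, if_neg hC, if_neg hB]
        rw [e1, ih, if_neg hC, if_neg hB]

lemma pvPairs_nil : pvPairs [] = [] := rfl

lemma pvPairs_single (e : Int × Nat × Bool) : pvPairs [e] = [] := rfl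

lemma pvPairs_cons₂ (e e2 : Int × Nat × Bool) (rest : List (Int × Nat × Bool)) :
    pvPairs (e :: e2 :: rest) =
      (if e.2.2 && !e2.2.2 then [(e2.1, e.2.1)] else []) ++ pvPairs (e2 :: rest) := by
  simp only [pvPairs, List.tail_cons, List.zip_cons_cons, List.filter_cons]
  by_cases h : e.2.2 && !e2.2.2 <;> simp [h]

lemma pv_pairs_cons (ls : List String) : ∀ (i j : Int) (n : Nat) (fl : Bool),
    pvPairs ((j, n, fl) :: pvEvts ls i) = pvIns ls i n fl := by
  induction ls with
  | nil => intro i j n fl; simp [pvEvts, pvPairs_single, pvIns]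
  | cons l ls ih =>
    intro i j n fl
    rw [pvEvts, pvIns]
    by_cases hC : PySem.Str.startswith (PySem.Str.strip l) "CHANNELS"
    · rw [if_pos hC, if_pos hC, pvPairs_cons₂]
      simp only [Bool.not_true, Bool.and_false, if_neg (Bool.false_ne_true), List.nil_append]
      exact ih (i + 1) i _ true
    · rw [if_neg hC, if_neg hC]
      by_cases hB : PySem.Str.startswith (PySem.Str.strip l) "}"
      · rw [if_pos hB, if_pos hB, pvPairs_cons₂]
        simp only [Bool.not_false, Bool.and_true]
        rw [ih (i + 1) i 0 false]
      · rw [if_neg hB, if_neg hB]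
        exact ih (i + 1) j n fl

lemma pv_pairs (ls : List String) : ∀ (i : Int),
    pvPairs (pvEvts ls i) = pvIns ls i 0 false := by
  induction ls with
  | nil => intro i; simp [pvEvts, pvPairs_nil, pvIns]
  | cons l ls ih =>
    intro i
    rw [pvEvts, pvIns]
    by_cases hC : PySem.Str.startswith (PySem.Str.strip l) "CHANNELS"
    · rw [if_pos hC, if_pos hC, pv_pairs_cons]
    · rw [if_neg hC, if_neg hC]
      by_cases hB : PySem.Str.startswith (PySem.Str.strip l) "}"
      · rw [if_pos hB, if_pos hB, pv_pairs_cons]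
        simp
      · rw [if_neg hB, if_neg hB]
        exact ih (i + 1)

lemma pv_foldR (ls : List String) (ins : List (Int × Nat)) : ∀ (i : Int) (out : List String) (k : Nat),
    ((PySem.List.enumerate ls i).foldl (pvStepR ins) (out, k)).1 = out ++ pvRebuild ls i (ins.drop k) := by
  induction ls with
  | nil => intro i out k; simp [PySem.List.enumerate_nil, pvRebuild]
  | cons l ls ih =>
    intro i out k
    rw [PySem.List.enumerate_cons, List.foldl_cons]
    cases h : ins[k]? with
    | none =>
      have hlen : ins.length ≤ k := List.getElem?_eq_none_iff.mp h
      have hdrop : ins.drop k = [] := List.drop_eq_nil_of_le hlen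
      have e1 : pvStepR ins (out, k) (i, l) = (out ++ [l], k) := by
        simp [pvStepR, h]
      rw [e1, ih, hdrop, pvRebuild]
      simp
    | some jd =>
      obtain ⟨j, d⟩ := jd
      obtain ⟨hk, hval⟩ := List.getElem?_eq_some_iff.mp h
      have hdrop : ins.drop k = (j, d) :: ins.drop (k + 1) := by
        rw [List.drop_eq_getElem_cons hk, hval]
      by_cases hj : j = i
      · subst hj
        have e1 : pvStepR ins (out, k) (j, l) = (out ++ pvEndSite d ++ [l], k + 1) := by
          simp [pvStepR, h]
        rw [e1, ih, hdrop, pvRebuild, if_pos rfl]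
        simp
      · have e1 : pvStepR ins (out, k) (i, l) = (out ++ [l], k) := by
          simp [pvStepR, h, hj]
        rw [e1, ih, hdrop, pvRebuild, if_neg hj, ← hdrop]
        simp

-- ===== VERDICT (by name: the statement is the Claim_ definition above) =====
theorem add_end_sites_spec : Claim_equal_add_end_sites := by
  intro input_text _
  unfold Spec_add_end_sites
  simp only [add_end_sites, add_end_sites_alt]
  set ls := (PySem.Str.split? input_text "\n").getD [] with hls
  rw [pv_foldA ls [] false 0, pv_foldE ls 0 [], List.nil_append, List.nil_append,
      pv_pairs ls 0, pv_foldR ls _ 0 [] 0, List.drop_zero, List.nil_append,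
      pv_bridge ls 0 false 0]
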